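-- pv_equiv track=rewrite | github.com/minwhoo/fine-grained-gender-control-mt | preprocessing/gate_dataset.py | get_entity_gender_combinations
-- ===== SOURCE A (Python) =====
-- def get_entity_gender_combinations(entities, gender_pronouns):
--     assert len(gender_pronouns) == 2
--     all_combs = []
--     for idx in range(2**len(entities)):
--         comb = []
--         cur = idx
--         for ent in reversed(entities):
--             comb.append((ent, gender_pronouns[cur % 2]))
--             cur //= 2
--         all_combs.append(list(reversed(comb)))
--     return all_combs
-- ===== SOURCE B (Python) =====
-- from itertools import product
--
-- def get_entity_gender_combinations(entities, gender_pronouns):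
--     assert len(gender_pronouns) == 2
--     return [list(zip(entities, combo))
--             for combo in product(gender_pronouns, repeat=len(entities))]
-- ===== Notes on version B (the rewrite author's own statement) =====
-- stated objective: idiomatic
-- what changed: Replaces the manual 2^n counter with binary bit-decoding per index by itertools.product over the pronoun pair, zipping each combination tuple with the entities.
import Mathlib
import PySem

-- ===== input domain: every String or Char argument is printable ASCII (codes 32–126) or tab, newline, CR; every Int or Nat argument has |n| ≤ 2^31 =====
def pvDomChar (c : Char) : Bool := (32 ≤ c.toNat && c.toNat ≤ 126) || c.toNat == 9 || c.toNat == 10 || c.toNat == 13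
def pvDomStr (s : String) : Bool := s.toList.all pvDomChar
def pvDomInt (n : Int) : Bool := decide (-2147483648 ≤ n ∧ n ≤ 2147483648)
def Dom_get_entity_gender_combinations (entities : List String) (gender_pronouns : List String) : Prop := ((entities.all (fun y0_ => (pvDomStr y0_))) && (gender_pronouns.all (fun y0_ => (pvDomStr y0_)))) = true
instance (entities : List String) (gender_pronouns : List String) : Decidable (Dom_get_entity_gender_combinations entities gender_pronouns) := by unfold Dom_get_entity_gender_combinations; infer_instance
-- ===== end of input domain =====

-- B builds the rows with the product recursion (itertools.product) and zip, instead of A's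
-- manual binary decoding of a 2^n counter; objective: idiomatic, same asymptotic cost.

-- ===== PORT A =====
-- inner loop body: comb.append((ent, gender_pronouns[cur % 2])); cur //= 2
def pvStepA (gp : List String) (acc : List (String × String) × Int) (ent : String) :
    List (String × String) × Int :=
  (acc.1 ++ [(ent, PySem.List.pyGetD gp (PySem.Int.mod acc.2 2) "")], PySem.Int.floordiv acc.2 2)

def get_entity_gender_combinations (entities : List String) (gender_pronouns : List String) :
    List (List (String × String)) :=
  (PySem.List.pyRange 0 ((2 : Int) ^ entities.length) 1).foldl
    (fun all_combs idx =>
      all_combs ++ [((entities.reverse.foldl (pvStepA gender_pronouns) ([], idx)).1).reverse]) []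

-- ===== PORT B =====
-- itertools.product(gender_pronouns, repeat=n): first coordinate varies slowest
def pvProduct (gp : List String) : Nat → List (List String)
  | 0 => [[]]
  | n + 1 => gp.flatMap (fun p => (pvProduct gp n).map (fun t => p :: t))

def get_entity_gender_combinations_alt (entities : List String) (gender_pronouns : List String) :
    List (List (String × String)) :=
  (pvProduct gender_pronouns entities.length).map (fun combo => entities.zip combo)

-- ===== PRECONDITION & SPEC =====
-- A asserts len(gender_pronouns) == 2 and raises AssertionError otherwise; Pre_ is exactly that.
def Pre_get_entity_gender_combinations (entities : List String) (gender_pronouns : List String) : Prop :=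
  gender_pronouns.length = 2

instance (entities : List String) (gender_pronouns : List String) :
    Decidable (Pre_get_entity_gender_combinations entities gender_pronouns) := by
  unfold Pre_get_entity_gender_combinations; infer_instance

def pvWitness_get_entity_gender_combinations : List String × List String :=
  (["alice", "bob"], ["he", "she"])

def Spec_get_entity_gender_combinations (entities : List String) (gender_pronouns : List String) (out : List (List (String × String))) : Prop := out = get_entity_gender_combinations_alt entities gender_pronouns
instance (entities : List String) (gender_pronouns : List String) (out : List (List (String × String))) : Decidable (Spec_get_entity_gender_combinations entities gender_pronouns out) := by unfold Spec_get_entity_gender_combinations; infer_instance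

-- ===== CLAIM (what is proved, stated in full; the proofs are below) =====
def Claim_equal_get_entity_gender_combinations : Prop := ∀ (entities : List String) (gender_pronouns : List String), Dom_get_entity_gender_combinations entities gender_pronouns → Pre_get_entity_gender_combinations entities gender_pronouns → Spec_get_entity_gender_combinations entities gender_pronouns (get_entity_gender_combinations entities gender_pronouns)

-- ===== LEMMAS AND PROOFS =====

-- the row A produces for a given counter value idx
def pvRow (gp es : List String) (idx : Int) : List (String × String) :=
  ((es.reverse.foldl (pvStepA gp) ([], idx)).1).reverse

theorem pvStepA_fold_acc (gp : List String) (l : List String) :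
    ∀ (acc : List (String × String)) (idx : Int),
      (l.foldl (pvStepA gp) (acc, idx)).1 = acc ++ (l.foldl (pvStepA gp) ([], idx)).1 ∧
      (l.foldl (pvStepA gp) (acc, idx)).2 = (l.foldl (pvStepA gp) ([], idx)).2 := by
  induction l with
  | nil => intro acc idx; simp
  | cons a l ih =>
    intro acc idx
    simp only [List.foldl_cons, pvStepA]
    obtain ⟨h1, h2⟩ := ih (acc ++ [(a, PySem.List.pyGetD gp (PySem.Int.mod idx 2) "")])
      (PySem.Int.floordiv idx 2)
    obtain ⟨h1', h2'⟩ := ih [(a, PySem.List.pyGetD gp (PySem.Int.mod idx 2) "")]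
      (PySem.Int.floordiv idx 2)
    simp only [List.nil_append]
    exact ⟨by rw [h1, h1', List.append_assoc], by rw [h2, h2']⟩

theorem pvStepA_fold_snd (gp : List String) (l : List String) :
    ∀ (idx : Int), (l.foldl (pvStepA gp) ([], idx)).2 = idx / (2 : Int) ^ l.length := by
  induction l with
  | nil => intro idx; simp
  | cons a l ih =>
    intro idx
    simp only [List.foldl_cons, pvStepA]
    rw [(pvStepA_fold_acc gp l _ _).2, ih, PySem.Int.floordiv_eq_ediv_of_pos (by norm_num)]
    rw [Int.ediv_ediv_of_nonneg (by norm_num : (0:Int) ≤ 2)]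
    rw [show ((2 : Int) ^ (a :: l).length) = 2 * (2 : Int) ^ l.length from by
      rw [List.length_cons, pow_succ]; ring]

theorem pvRow_cons (gp : List String) (e : String) (es : List String) (idx : Int) :
    pvRow gp (e :: es) idx =
      (e, PySem.List.pyGetD gp (PySem.Int.mod (idx / (2 : Int) ^ es.length) 2) "") ::
        pvRow gp es idx := by
  simp only [pvRow, List.reverse_cons, List.foldl_append, List.foldl_cons, List.foldl_nil]
  rw [show ∀ s, (pvStepA gp s e) = (s.1 ++ [(e, PySem.List.pyGetD gp (PySem.Int.mod s.2 2) "")],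
        PySem.Int.floordiv s.2 2) from fun _ => rfl]
  rw [pvStepA_fold_snd gp es.reverse idx, List.length_reverse]
  simp

-- adding a multiple of 2^|es| to the counter does not change the row (only higher bits change)
theorem pvRow_shift (gp : List String) : ∀ (es : List String) (j m : Int),
    pvRow gp es (j + (2 : Int) ^ es.length * m) = pvRow gp es j := by
  intro es
  induction es with
  | nil => intro j m; rfl
  | cons e es ih =>
    intro j m
    rw [pvRow_cons, pvRow_cons]
    have hpow : (2 : Int) ^ (e :: es).length = (2 : Int) ^ es.length * 2 := by
      simp [List.length_cons, pow_succ]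
    have h2 : j + (2 : Int) ^ (e :: es).length * m = j + (2 : Int) ^ es.length * (2 * m) := by
      rw [hpow]; ring
    rw [h2, ih]
    congr 2
    have hne : ((2 : Int) ^ es.length) ≠ 0 := by positivity
    have hdiv : (j + (2 : Int) ^ es.length * (2 * m)) / (2 : Int) ^ es.length
        = j / (2 : Int) ^ es.length + 2 * m := by
      exact Int.add_mul_ediv_left _ _ hne
    rw [hdiv, PySem.Int.mod_eq_emod_of_pos (by norm_num),
        PySem.Int.mod_eq_emod_of_pos (by norm_num)]
    congr 1
    generalize j / (2 : Int) ^ es.length = x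
    omega

theorem pv_fold_append_map (f : Int → List (String × String)) (l : List Int) :
    ∀ acc, l.foldl (fun all idx => all ++ [f idx]) acc = acc ++ l.map f := by
  induction l with
  | nil => intro acc; simp
  | cons a l ih => intro acc; simp [ih]

theorem pv_main (p0 p1 : String) : ∀ (es : List String),
    (PySem.List.pyRange 0 ((2 : Int) ^ es.length) 1).map (pvRow [p0, p1] es) =
      (pvProduct [p0, p1] es.length).map (fun t => es.zip t) := by
  intro es
  induction es with
  | nil =>
    show (PySem.List.pyRange 0 ((2 : Int) ^ ([] : List String).length) 1).map
        (pvRow [p0, p1] []) = _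
    norm_num [PySem.List.pyRange_one, pvRow, pvProduct, pvStepA]
  | cons e es ih =>
    have hpos : (0 : Int) < (2 : Int) ^ es.length := by positivity
    have hsplit : PySem.List.pyRange 0 ((2 : Int) ^ (e :: es).length) 1 =
        PySem.List.pyRange 0 ((2 : Int) ^ es.length) 1 ++
        PySem.List.pyRange ((2 : Int) ^ es.length) ((2 : Int) ^ (e :: es).length) 1 := by
      refine PySem.List.pyRange_one_append _ _ _ (le_of_lt hpos) ?_
      simp [List.length_cons, pow_succ]
    rw [hsplit, List.map_append]
    -- first half: high bit is 0, pronoun p0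
    have h1 : (PySem.List.pyRange 0 ((2 : Int) ^ es.length) 1).map (pvRow [p0, p1] (e :: es)) =
        (PySem.List.pyRange 0 ((2 : Int) ^ es.length) 1).map
          (fun idx => (e, p0) :: pvRow [p0, p1] es idx) := by
      refine List.map_congr_left ?_
      intro idx hidx
      rw [PySem.List.mem_pyRange_one] at hidx
      rw [pvRow_cons]
      have : idx / (2 : Int) ^ es.length = 0 := Int.ediv_eq_zero_of_lt hidx.1 hidx.2
      rw [this]
      have hm : PySem.Int.mod 0 2 = 0 := by decide
      rw [hm]
      rfl
    -- second half: high bit is 1, pronoun p1, low bits as in the first half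
    have h2 : (PySem.List.pyRange ((2 : Int) ^ es.length) ((2 : Int) ^ (e :: es).length) 1).map
          (pvRow [p0, p1] (e :: es)) =
        (PySem.List.pyRange 0 ((2 : Int) ^ es.length) 1).map
          (fun idx => (e, p1) :: pvRow [p0, p1] es idx) := by
      rw [PySem.List.pyRange_one ((2 : Int) ^ es.length) ((2 : Int) ^ (e :: es).length),
          PySem.List.pyRange_one 0 ((2 : Int) ^ es.length)]
      rw [show ((2 : Int) ^ (e :: es).length - (2 : Int) ^ es.length) = (2 : Int) ^ es.length from by
            rw [List.length_cons, pow_succ]; ring,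
          show ((2 : Int) ^ es.length - 0) = (2 : Int) ^ es.length from by ring]
      rw [List.map_map, List.map_map]
      refine List.map_congr_left ?_
      intro k hk
      rw [List.mem_range] at hk
      simp only [Function.comp_apply, zero_add]
      have hkI : (k : Int) < (2 : Int) ^ es.length := by omega
      have hsh : ((2 : Int) ^ es.length + (k : Int)) = (k : Int) + (2 : Int) ^ es.length * 1 := by
        ring
      rw [pvRow_cons, hsh, pvRow_shift]
      have hkb : ((k : Int) + (2 : Int) ^ es.length * 1) / (2 : Int) ^ es.length = 1 := by
        rw [Int.add_mul_ediv_left _ _ (by positivity : ((2 : Int) ^ es.length) ≠ 0)]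
        have h0 : ((k : Int)) / (2 : Int) ^ es.length = 0 :=
          Int.ediv_eq_zero_of_lt (by positivity) hkI
        omega
      rw [hkb]
      have hm : PySem.Int.mod 1 2 = 1 := by decide
      rw [hm]
      rfl
    rw [h1, h2]
    have hprod : pvProduct [p0, p1] (e :: es).length =
        (pvProduct [p0, p1] es.length).map (fun t => p0 :: t) ++
        (pvProduct [p0, p1] es.length).map (fun t => p1 :: t) := by
      simp [List.length_cons, pvProduct, List.flatMap]
    rw [hprod, List.map_append, List.map_map, List.map_map]
    have hz : ∀ (p : String),
        ((fun t => (e :: es).zip t) ∘ (fun t => p :: t)) = fun t => (e, p) :: es.zip t := by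
      intro p; funext t; simp
    rw [hz p0, hz p1]
    rw [show (fun idx => (e, p0) :: pvRow [p0, p1] es idx)
          = (fun r => (e, p0) :: r) ∘ (pvRow [p0, p1] es) from rfl,
        show (fun idx => (e, p1) :: pvRow [p0, p1] es idx)
          = (fun r => (e, p1) :: r) ∘ (pvRow [p0, p1] es) from rfl]
    rw [← List.map_map, ← List.map_map, ih]
    simp only [List.map_map]
    rfl

-- ===== VERDICT (by name: the statement is the Claim_ definition above) =====
theorem get_entity_gender_combinations_spec : Claim_equal_get_entity_gender_combinations := by
  intro entities gp _ hpre
  unfold Pre_get_entity_gender_combinations at hpre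
  match gp, hpre with
  | [p0, p1], _ =>
    show get_entity_gender_combinations entities [p0, p1]
        = get_entity_gender_combinations_alt entities [p0, p1]
    unfold get_entity_gender_combinations get_entity_gender_combinations_alt
    show (PySem.List.pyRange 0 ((2 : Int) ^ entities.length) 1).foldl
        (fun all idx => all ++ [pvRow [p0, p1] entities idx]) [] = _
    rw [pv_fold_append_map (pvRow [p0, p1] entities)
          (PySem.List.pyRange 0 ((2 : Int) ^ entities.length) 1) []]
    rw [List.nil_append, pv_main]
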